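-- pv_equiv track=rewrite | github.com/MrBrantCode/unitest_baseline | mut_generate/mist_train_taco/taco_2107/solution.py | calculate_p_values
-- ===== SOURCE A (Python) =====
-- def calculate_p_values(n, a_a):
--     def bit_update(bit_a, i, v):
--         while i < len(bit_a):
--             bit_a[i] += v
--             i += i & -i
--
--     def bit_query(bit_a, i):
--         r = 0
--         while i > 0:
--             r += bit_a[i]
--             i -= i & -i
--         return r
--
--     def bit_range_query(bit_a, l, r):
--         return bit_query(bit_a, r) - bit_query(bit_a, l - 1)
--
--     N = max(a_a) + 1
--     bit_a = [0 for _ in range(N * 2)]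
--     bit_a2 = [0 for _ in range(N * 2)]
--     p_a = [0] * n
--     ans = sum = 0
--
--     for i in range(1, n + 1):
--         x = a_a[i - 1]
--         ans += x * (i - 1)
--         ans += sum
--         sum += x
--         ans -= bit_query(bit_a, x)
--         j = x
--         while j < N:
--             l = j
--             r = l + x - 1
--             ans -= bit_range_query(bit_a2, l, r) * j
--             bit_update(bit_a, l, x)
--             j += x
--         bit_update(bit_a2, x, 1)
--         p_a[i - 1] = ans
--
--     return p_a
-- ===== SOURCE B (Python) =====
-- def calculate_p_values(n, a_a):
--     p_a = []
--     total = 0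
--     for i in range(n):
--         x = a_a[i]
--         for j in range(i):
--             y = a_a[j]
--             total += x % y + y % x
--         p_a.append(total)
--     return p_a
-- ===== Notes on version B (the rewrite author's own statement) =====
-- stated objective: simpler
-- what changed: Replaces the two Fenwick (BIT) trees and the multiple-stride sieve over [0, 2*max) with a direct running accumulator over pairs: p_a[i] is the cumulative sum of a[i] % a[j] + a[j] % a[i] over all j < i, so no auxiliary arrays, no bit tricks, and no dependence on the magnitude of the values.
import Mathlib
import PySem

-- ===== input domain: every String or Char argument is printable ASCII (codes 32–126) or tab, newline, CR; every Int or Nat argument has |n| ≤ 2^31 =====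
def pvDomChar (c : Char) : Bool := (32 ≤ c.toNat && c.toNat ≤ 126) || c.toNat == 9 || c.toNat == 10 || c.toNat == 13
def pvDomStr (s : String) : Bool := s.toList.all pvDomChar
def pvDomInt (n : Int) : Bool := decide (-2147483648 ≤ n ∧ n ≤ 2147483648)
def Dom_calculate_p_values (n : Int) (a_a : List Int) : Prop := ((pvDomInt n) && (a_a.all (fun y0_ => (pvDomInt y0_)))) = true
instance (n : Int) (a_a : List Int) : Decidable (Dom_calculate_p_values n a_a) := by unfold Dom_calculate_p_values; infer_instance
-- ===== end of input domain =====

-- B replaces A's two Fenwick (BIT) trees and value-range sieve with a direct O(n²) running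
-- accumulator over pairs (a[i] % a[j] + a[j] % a[i]); same return value on all inputs admitted
-- by Pre_ below (objective: simpler, not claimed faster).


-- ===== PORT A =====
-- ===== ports =====
-- Python's  i & -i  (lowest set bit for positive i)
def pyLowbit (i : Int) : Int := PySem.Int.band i (-i)

-- `while i < len(bit): bit[i] += v; i += i & -i` — fuel-bounded structural recursion; for
-- positive i the index strictly increases each turn, so `bit.length + 1` turns always suffice
-- (the 0 < i guard makes the loop total; Python diverges there and Pre_ excludes it).
def bitUpdateGo (v : Int) : Nat → List Int → Int → List Int
  | 0, bit, _ => bit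
  | fuel+1, bit, i =>
      if 0 < i ∧ i < bit.length then
        bitUpdateGo v fuel (bit.set i.toNat (bit.getD i.toNat 0 + v)) (i + pyLowbit i)
      else bit

def bitUpdateA (bit : List Int) (i v : Int) : List Int := bitUpdateGo v (bit.length + 1) bit i

-- `r = 0; while i > 0: r += bit[i]; i -= i & -i` — i strictly decreases, i.toNat + 1 turns suffice
def bitQueryGo (bit : List Int) : Nat → Int → Int → Int
  | 0, _, r => r
  | fuel+1, i, r => if 0 < i then bitQueryGo bit fuel (i - pyLowbit i) (r + bit.getD i.toNat 0) else r

def bitQueryA (bit : List Int) (i r : Int) : Int := bitQueryGo bit (i.toNat + 1) i r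

def bitRangeQueryA (bit : List Int) (l r : Int) : Int :=
  bitQueryA bit r 0 - bitQueryA bit (l - 1) 0

-- the `while j < N` loop of A; j increases by x ≥ 1 each turn (0 < x guard: Python diverges on x ≤ 0)
def jloopGo (bit2 : List Int) (N x : Int) : Nat → List Int → Int → Int → List Int × Int
  | 0, bit, ans, _ => (bit, ans)
  | fuel+1, bit, ans, j =>
      if j < N ∧ 0 < x then
        jloopGo bit2 N x fuel (bitUpdateA bit j x)
          (ans - bitRangeQueryA bit2 j (j + x - 1) * j) (j + x)
      else (bit, ans)

def jloopA (bit2 : List Int) (N x : Int) (bit : List Int) (ans j : Int) : List Int × Int :=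
  jloopGo bit2 N x ((N - j).toNat + 1) bit ans j

-- outer loop body of A (one iteration of `for i in range(1, n+1)`)

-- ===== outer step of port A =====
def stepA (a_a : List Int) (N : Int) (st : List Int × List Int × List Int × Int × Int) (i : Int) :
    List Int × List Int × List Int × Int × Int :=
  match st with
  | (bit, bit2, p, ans, s) =>
    let x := PySem.List.pyGetD a_a (i - 1) 0
    let ans1 := ans + x * (i - 1) + s
    let s' := s + x
    let ans2 := ans1 - bitQueryA bit x 0
    let r := jloopA bit2 N x bit ans2 x
    (r.1, bitUpdateA bit2 x 1, p.set (i - 1).toNat r.2, r.2, s')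

def calculate_p_values (n : Int) (a_a : List Int) : List Int :=
  let N : Int := (PySem.List.max? a_a (fun y => y)).getD 0 + 1
  let bit_a : List Int := List.replicate (N * 2).toNat 0
  let bit_a2 : List Int := List.replicate (N * 2).toNat 0
  let p_a : List Int := List.replicate n.toNat 0
  ((PySem.List.pyRange 1 (n + 1) 1).foldl (stepA a_a N) (bit_a, bit_a2, p_a, 0, 0)).2.2.1


-- ===== PORT B =====
def calculate_p_values_alt (n : Int) (a_a : List Int) : List Int :=
  ((PySem.List.pyRange 0 n 1).foldl (fun (st : List Int × Int) i =>
      let x := PySem.List.pyGetD a_a i 0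
      let total := (PySem.List.pyRange 0 i 1).foldl (fun t j =>
          let y := PySem.List.pyGetD a_a j 0
          t + (PySem.Int.mod x y + PySem.Int.mod y x)) st.2
      (st.1 ++ [total], total)) (([] : List Int), (0 : Int))).1


-- ===== PRECONDITION & SPEC =====
-- Pre_ excludes exactly the inputs where Python A does not return normally: empty a_a (max()
-- raises ValueError), n > len(a_a) (IndexError), and non-positive values among the first n
-- elements (the BIT loops diverge or index out of range there).
def Pre_calculate_p_values (n : Int) (a_a : List Int) : Prop :=
  a_a ≠ [] ∧ n ≤ (a_a.length : Int) ∧ ∀ y ∈ a_a.take n.toNat, 1 ≤ y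
instance (n : Int) (a_a : List Int) : Decidable (Pre_calculate_p_values n a_a) := by
  unfold Pre_calculate_p_values; infer_instance

def pvWitness_calculate_p_values : Int × List Int := (3, [5, 3, 7])

def Spec_calculate_p_values (n : Int) (a_a : List Int) (out : List Int) : Prop := out = calculate_p_values_alt n a_a
instance (n : Int) (a_a : List Int) (out : List Int) : Decidable (Spec_calculate_p_values n a_a out) := by unfold Spec_calculate_p_values; infer_instance

-- ===== CLAIM (what is proved, stated in full; the proofs are below) =====
def Claim_equal_calculate_p_values : Prop := ∀ (n : Int) (a_a : List Int), Dom_calculate_p_values n a_a → Pre_calculate_p_values n a_a → Spec_calculate_p_values n a_a (calculate_p_values n a_a)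

-- ===== LEMMAS AND PROOFS =====
-- (arithmetic of the lowest set bit, Fenwick-tree invariants, and the loop invariants of both ports)

-- lowest set bit of k as a power of two
def lbN (k : Nat) : Nat := 2 ^ (k.factorization 2)

theorem lbN_pos (k : Nat) : 0 < lbN k := Nat.two_pow_pos _

theorem lbN_le (k : Nat) (hk : 0 < k) : lbN k ≤ k := Nat.ordProj_le 2 hk.ne'

theorem land_odd_pred (m : Nat) : (2*m+1) &&& (2*m) = 2*m := by
  apply Nat.eq_of_testBit_eq
  intro i
  rw [Nat.testBit_and]
  cases i with
  | zero =>
      rw [Nat.testBit_zero, Nat.testBit_zero]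
      have h1 : (2*m+1) % 2 = 1 := by omega
      have h2 : (2*m) % 2 = 0 := by omega
      rw [h1, h2]; simp
  | succ i =>
      rw [Nat.testBit_succ, Nat.testBit_succ]
      have h1 : (2*m+1)/2 = m := by omega
      have h2 : (2*m)/2 = m := by omega
      rw [h1, h2, Bool.and_self]

theorem land_even_pred (m : Nat) (hm : 0 < m) : (2*m) &&& (2*m-1) = 2*(m &&& (m-1)) := by
  apply Nat.eq_of_testBit_eq
  intro i
  rw [Nat.testBit_and]
  cases i with
  | zero =>
      rw [Nat.testBit_zero, Nat.testBit_zero, Nat.testBit_zero]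
      have h1 : (2*m) % 2 = 0 := by omega
      have h2 : (2*(m &&& (m-1))) % 2 = 0 := by omega
      rw [h1, h2]; simp
  | succ i =>
      rw [Nat.testBit_succ, Nat.testBit_succ, Nat.testBit_succ]
      have h1 : (2*m)/2 = m := by omega
      have h2 : (2*m-1)/2 = m-1 := by omega
      have h3 : (2*(m &&& (m-1)))/2 = m &&& (m-1) := by omega
      rw [h1, h2, h3, Nat.testBit_and]

theorem sub_land_pred (k : Nat) (hk : 0 < k) : k - (k &&& (k-1)) = lbN k := by
  induction k using Nat.strong_induction_on with
  | _ k ih =>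
    rcases Nat.even_or_odd k with ⟨m, hm⟩ | ⟨m, hm⟩
    · -- k = 2m
      have hm1 : 0 < m := by omega
      have hk2 : k = 2*m := by omega
      subst hk2
      rw [land_even_pred m hm1]
      have hle : m &&& (m-1) ≤ m := Nat.and_le_left
      have ihm := ih m (by omega) hm1
      have : 2*m - 2*(m &&& (m-1)) = 2*(m - (m &&& (m-1))) := by omega
      rw [this, ihm]
      unfold lbN
      have : (2*m).factorization 2 = m.factorization 2 + 1 := by
        simp [Nat.factorization_mul (by norm_num : (2:Nat) ≠ 0) hm1.ne',
          Nat.Prime.factorization_self Nat.prime_two]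
        omega
      rw [this, pow_succ]
      ring
    · -- k = 2m+1
      have hk2 : k = 2*m+1 := by omega
      subst hk2
      have h1 : 2*m+1-1 = 2*m := by omega
      rw [h1, land_odd_pred]
      unfold lbN
      have : (2*m+1).factorization 2 = 0 :=
        Nat.factorization_eq_zero_of_not_dvd (by omega)
      rw [this]
      omega

-- bridge: Python's  i & -i  on a positive int
theorem band_neg_self (k : Nat) (hk : 0 < k) :
    PySem.Int.band (k:Int) (-(k:Int)) = ((lbN k : Nat) : Int) := by
  have h1 : (-(k:Int)) = Int.negSucc (k-1) := by
    rw [Int.negSucc_eq]; push_cast; omega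
  rw [h1]
  have h2 : PySem.Int.band (k:Int) (Int.negSucc (k-1)) = ((k - (k &&& (k-1)) : Nat) : Int) := by
    simp [PySem.Int.band]
  rw [h2, sub_land_pred k hk]

theorem gapN {d a b : Nat} (hd : 0 < d) (h1 : d ∣ a) (h2 : d ∣ b) (h : a < b) : a + d ≤ b := by
  have h3 : d ∣ b - a := Nat.dvd_sub h2 h1
  have h4 : d ≤ b - a := Nat.le_of_dvd (by omega) h3
  omega

theorem lbN_dvd' (k : Nat) (hk : 0 < k) : lbN k ∣ k := Nat.ordProj_dvd k 2

theorem two_lbN_dvd (k : Nat) (hk : 0 < k) : 2 * lbN k ∣ k + lbN k := by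
  obtain ⟨c, hc⟩ := lbN_dvd' k hk
  have hodd : ¬ 2 ∣ c := by
    rintro ⟨e, he⟩
    have h2 : (2:Nat) ^ (k.factorization 2 + 1) ∣ k := by
      have hlb : lbN k = 2 ^ (k.factorization 2) := rfl
      refine ⟨e, ?_⟩
      calc k = lbN k * c := hc
        _ = 2 ^ (k.factorization 2) * (2 * e) := by rw [hlb, he]
        _ = 2 ^ (k.factorization 2 + 1) * e := by ring
    exact Nat.pow_succ_factorization_not_dvd hk.ne' Nat.prime_two h2
  obtain ⟨e, he⟩ : 2 ∣ c + 1 := by omega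
  refine ⟨e, ?_⟩
  set s := lbN k with hs
  rw [hc]
  have : c + 1 = 2 * e := he
  nlinarith [this]

theorem pow_dvd_lbN {t k : Nat} (hk : 0 < k) (h : 2^t ∣ k) : 2^t ∣ lbN k := by
  have ht : t ≤ k.factorization 2 :=
    (Nat.Prime.pow_dvd_iff_le_factorization Nat.prime_two hk.ne').mp h
  exact pow_dvd_pow 2 ht

theorem lbN_comparable (a b : Nat) : lbN a ∣ lbN b ∨ lbN b ∣ lbN a := by
  rcases le_total (a.factorization 2) (b.factorization 2) with h | h
  · exact Or.inl (pow_dvd_pow 2 h)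
  · exact Or.inr (pow_dvd_pow 2 h)

def CovN (p q : Nat) : Prop := q - lbN q < p ∧ p ≤ q

theorem covN_self {p : Nat} (hp : 0 < p) : CovN p p :=
  ⟨by have := lbN_pos p; omega, le_rfl⟩

theorem covN_step {p q : Nat} (hp : 0 < p) (h : CovN p q) (hlt : p < q) : CovN (p + lbN p) q := by
  obtain ⟨hA, hB⟩ := h
  have hq : 0 < q := by omega
  have hlq := lbN_le q hq
  have hlqp := lbN_pos q
  have hlpp := lbN_pos p
  rcases lbN_comparable p q with hc | hc
  · refine ⟨by omega, ?_⟩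
    exact gapN hlpp (lbN_dvd' p hp) (hc.trans (lbN_dvd' q hq)) hlt
  · exfalso
    have h1 : lbN q ∣ p := hc.trans (lbN_dvd' p hp)
    have h2 := gapN hlqp h1 (lbN_dvd' q hq) hlt
    omega

theorem covN_back {p q : Nat} (hp : 0 < p) (h : CovN (p + lbN p) q) : CovN p q := by
  obtain ⟨hA, hB⟩ := h
  have hlbp := lbN_pos p
  have hp' : 0 < p + lbN p := by omega
  have hq : 0 < q := by omega
  have hd2 : 2 * lbN p ∣ lbN (p + lbN p) := by
    have h2 : (2:Nat) ^ (p.factorization 2 + 1) = 2 * lbN p := by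
      unfold lbN; rw [pow_succ]; ring
    rw [← h2]
    apply pow_dvd_lbN hp'
    rw [h2]
    exact two_lbN_dvd p hp
  have hd2' : 2 * lbN p ≤ lbN (p + lbN p) := Nat.le_of_dvd (lbN_pos _) hd2
  have hlbp'le : lbN (p + lbN p) ≤ p + lbN p := lbN_le _ hp'
  have hlbple : lbN p ≤ p := lbN_le p hp
  have hlq := lbN_le q hq
  have hlqp := lbN_pos q
  rcases lbN_comparable (p + lbN p) q with hc | hc
  · have h1 : lbN (p + lbN p) ∣ q - lbN q := Nat.dvd_sub (hc.trans (lbN_dvd' q hq)) hc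
    rcases Nat.eq_zero_or_pos (q - lbN q) with hz | hz
    · exact ⟨by omega, by omega⟩
    · have h2 : lbN (p + lbN p) ≤ q - lbN q := Nat.le_of_dvd hz h1
      have h3 : lbN (p + lbN p) ∣ p + lbN p := lbN_dvd' _ hp'
      have h4 := gapN (lbN_pos (p + lbN p)) h1 h3 hA
      exact ⟨by omega, by omega⟩
  · have h1 : lbN q ∣ p + lbN p := hc.trans (lbN_dvd' _ hp')
    have heq : q = p + lbN p := by
      by_contra hne
      have hlt : p + lbN p < q := by omega
      have h2 := gapN hlqp h1 (lbN_dvd' q hq) hlt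
      omega
    have hlbeq : lbN q = lbN (p + lbN p) := by rw [heq]
    exact ⟨by omega, by omega⟩


theorem pyLowbit_eq {k : Nat} (hk : 0 < k) : pyLowbit (k:Int) = ((lbN k : Nat) : Int) :=
  band_neg_self k hk

def covInv (L : Nat) (b : List Int) (pts : Nat → Int) : Prop :=
  b.length = L ∧ ∀ q : Nat, 0 < q → q < L → b.getD q 0 = ∑ t ∈ Finset.Ioc (q - lbN q) q, pts t

theorem covInv_zero (L : Nat) : covInv L (List.replicate L (0:Int)) (fun _ => 0) := by
  refine ⟨List.length_replicate, ?_⟩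
  intro q hq hqL
  rw [List.getD_eq_getElem?_getD]
  simp [hqL]

theorem bitQueryGo_spec {L : Nat} {b : List Int} {pts : Nat → Int} (h : covInv L b pts) :
    ∀ (fuel k : Nat), k < fuel → k < L → ∀ r : Int,
      bitQueryGo b fuel (k:Int) r = r + ∑ t ∈ Finset.Ioc 0 k, pts t := by
  intro fuel
  induction fuel with
  | zero => intro k hk hkL r; exact absurd hk (by omega)
  | succ fuel ih =>
      intro k hk hkL r
      simp only [bitQueryGo]
      rcases Nat.eq_zero_or_pos k with h0 | h0
      · subst h0; simp
      · rw [if_pos (by exact_mod_cast h0)]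
        rw [pyLowbit_eq h0]
        have hle := lbN_le k h0
        have hpos := lbN_pos k
        have hc : (k:Int) - ((lbN k : Nat):Int) = ((k - lbN k : Nat) : Int) := by omega
        have ht : ((k:Int)).toNat = k := by omega
        rw [hc, ht, ih (k - lbN k) (by omega) (by omega)]
        rw [h.2 k h0 hkL]
        have := Finset.sum_Ioc_consecutive pts (by omega : 0 ≤ k - lbN k) (by omega : k - lbN k ≤ k)
        omega

theorem bitQueryA_spec {L : Nat} {b : List Int} {pts : Nat → Int} (h : covInv L b pts) :
    ∀ (k : Nat), k < L → ∀ r : Int, bitQueryA b (k:Int) r = r + ∑ t ∈ Finset.Ioc 0 k, pts t := by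
  intro k hkL r
  unfold bitQueryA
  rw [Int.toNat_natCast]
  exact bitQueryGo_spec h (k+1) k (by omega) hkL r

theorem bitUpdateGo_spec (v : Int) : ∀ (fuel : Nat) (b : List Int) (p : Nat), 0 < p → b.length ≤ p + fuel →
    (bitUpdateGo v fuel b (p:Int)).length = b.length ∧
    ∀ q : Nat, 0 < q → q < b.length →
      (bitUpdateGo v fuel b (p:Int)).getD q 0
        = b.getD q 0 + (if q - lbN q < p ∧ p ≤ q then v else 0) := by
  intro fuel
  induction fuel with
  | zero =>
      intro b p hp hm
      refine ⟨rfl, ?_⟩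
      intro q hq hqL
      simp only [bitUpdateGo]
      rw [if_neg (by rintro ⟨-, h2⟩; omega)]
      omega
  | succ fuel ih =>
      intro b p hp hm
      simp only [bitUpdateGo]
      by_cases hpL : p < b.length
      · rw [if_pos ⟨by exact_mod_cast hp, by exact_mod_cast hpL⟩]
        have hlb := lbN_pos p
        have hcast : (p:Int) + pyLowbit (p:Int) = ((p + lbN p : Nat) : Int) := by
          rw [pyLowbit_eq hp]; push_cast; ring
        have htn : ((p:Int)).toNat = p := by omega
        rw [htn, hcast]
        set b' := b.set p (b.getD p 0 + v) with hb'
        have hlen' : b'.length = b.length := by simp [hb']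
        obtain ⟨hL2, hQ2⟩ := ih b' (p + lbN p) (by omega) (by omega)
        refine ⟨by rw [hL2, hlen'], ?_⟩
        intro q hq hqL
        rw [hQ2 q hq (by omega)]
        have hgd : b'.getD q 0 = b.getD q 0 + (if q = p then v else 0) := by
          by_cases hqp : q = p
          · subst hqp
            rw [if_pos rfl, hb', List.getD_eq_getElem?_getD, List.getElem?_set_self (by omega)]
            rw [List.getD_eq_getElem?_getD]
            have hsome : b[q]? = some b[q] := List.getElem?_eq_getElem hpL
            simp [hsome]
          · rw [if_neg hqp, hb', List.getD_eq_getElem?_getD, List.getElem?_set_ne (by omega)]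
            rw [List.getD_eq_getElem?_getD]; omega
        rw [hgd]
        by_cases hqp : q = p
        · subst hqp
          rw [if_pos rfl]
          have hcov := covN_self hp
          rw [if_pos (show q - lbN q < q ∧ q ≤ q from ⟨hcov.1, hcov.2⟩)]
          rw [if_neg (show ¬ (q - lbN q < q + lbN q ∧ q + lbN q ≤ q) by rintro ⟨-, h2⟩; omega)]
          ring
        · rw [if_neg hqp]
          by_cases hc : q - lbN q < p ∧ p ≤ q
          · have hlt : p < q := by omega
            have hcov := covN_step hp ⟨hc.1, hc.2⟩ hlt
            rw [if_pos hc, if_pos (by exact ⟨hcov.1, hcov.2⟩)]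
            ring
          · rw [if_neg hc]
            rw [if_neg (by
              rintro hcc
              exact hc (by
                have := covN_back hp ⟨hcc.1, hcc.2⟩
                exact ⟨this.1, this.2⟩))]
            ring
      · rw [if_neg (by intro hcon; exact hpL (by exact_mod_cast hcon.2))]
        refine ⟨rfl, ?_⟩
        intro q hq hqL
        rw [if_neg (by rintro ⟨-, h2⟩; omega)]
        omega

theorem bitUpdateA_spec (v : Int) (b : List Int) (p : Nat) (hp : 0 < p) :
    (bitUpdateA b (p:Int) v).length = b.length ∧
    ∀ q : Nat, 0 < q → q < b.length →
      (bitUpdateA b (p:Int) v).getD q 0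
        = b.getD q 0 + (if q - lbN q < p ∧ p ≤ q then v else 0) := by
  unfold bitUpdateA
  exact bitUpdateGo_spec v (b.length + 1) b p hp (by omega)

theorem covInv_congr {L : Nat} {b : List Int} {f g : Nat → Int}
    (hfg : ∀ t, 0 < t → f t = g t) (h : covInv L b f) : covInv L b g := by
  refine ⟨h.1, fun q hq hqL => ?_⟩
  rw [h.2 q hq hqL]
  refine Finset.sum_congr rfl ?_
  intro t ht
  rw [Finset.mem_Ioc] at ht
  exact hfg t (by omega)

theorem covInv_update {L : Nat} {b : List Int} {pts : Nat → Int} (h : covInv L b pts)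
    {p : Nat} (hp : 0 < p) (hpL : p < L) (v : Int) :
    covInv L (bitUpdateA b (p:Int) v) (fun t => pts t + if t = p then v else 0) := by
  obtain ⟨hlen, hq⟩ := h
  obtain ⟨hL2, hQ2⟩ := bitUpdateA_spec v b p hp
  refine ⟨hL2.trans hlen, ?_⟩
  intro q hq0 hqL
  rw [hQ2 q hq0 (by omega), hq q hq0 hqL]
  rw [Finset.sum_add_distrib, Finset.sum_ite_eq' (Finset.Ioc (q - lbN q) q) p (fun _ => v)]
  simp [Finset.mem_Ioc]

-- number-of-multiples sum
theorem sum_dvd_count (d : Nat) (hd : 0 < d) (c : Int) :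
    ∀ x : Nat, (∑ t ∈ Finset.Ioc 0 x, if d ∣ t then c else 0) = ((x / d : Nat) : Int) * c := by
  intro x
  induction x with
  | zero => simp
  | succ x ihx =>
      rw [Finset.sum_Ioc_succ_top (by omega)]
      rw [ihx, Nat.succ_div]
      split_ifs with h1
      · push_cast; ring
      · push_cast; ring

theorem jloopGo_spec (L NN xx : Nat) (bit2 : List Int) (pts2 : Nat → Int)
    (h2 : covInv L bit2 pts2) (hx : 0 < xx) (hL : L = 2*NN) (hxN : xx < NN) :
    ∀ (fuel : Nat) (c : Nat), 0 < c → NN ≤ c * xx + fuel →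
    ∀ (bit : List Int) (pts1 : Nat → Int), covInv L bit pts1 → ∀ ans : Int,
    (jloopGo bit2 (NN:Int) (xx:Int) fuel bit ans ((c*xx : Nat):Int)).2
        = ans - ∑ m ∈ Finset.Ico c NN,
            (if m*xx < NN then (∑ t ∈ Finset.Ioc (m*xx - 1) (m*xx + xx - 1), pts2 t) * ((m*xx : Nat):Int) else 0)
    ∧ covInv L (jloopGo bit2 (NN:Int) (xx:Int) fuel bit ans ((c*xx:Nat):Int)).1
        (fun t => pts1 t + if (1 ≤ t ∧ t < NN ∧ xx ∣ t ∧ c*xx ≤ t) then (xx:Int) else 0) := by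
  intro fuel
  induction fuel with
  | zero =>
      intro c hc hfuel bit pts1 h1 ans
      simp only [jloopGo]
      constructor
      · rw [Finset.sum_eq_zero, sub_zero]
        intro m hm
        rw [Finset.mem_Ico] at hm
        have : NN ≤ m * xx := le_trans (by omega) (Nat.mul_le_mul_right xx hm.1)
        rw [if_neg (by omega)]
      · refine covInv_congr ?_ h1
        intro t ht
        rw [if_neg (by rintro ⟨-, h3, -, h4⟩; omega)]
        ring
  | succ fuel ih =>
      intro c hc hfuel bit pts1 h1 ans
      by_cases hstop : NN ≤ c * xx
      · simp only [jloopGo]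
        rw [if_neg (by
          rintro ⟨hlt, -⟩
          have : (c*xx : Nat) < (NN:Nat) := by exact_mod_cast hlt
          omega)]
        constructor
        · rw [Finset.sum_eq_zero, sub_zero]
          intro m hm
          rw [Finset.mem_Ico] at hm
          have : NN ≤ m * xx := le_trans (by omega) (Nat.mul_le_mul_right xx hm.1)
          rw [if_neg (by omega)]
        · refine covInv_congr ?_ h1
          intro t ht
          rw [if_neg (by rintro ⟨-, h3, -, h4⟩; omega)]
          ring
      · have hcxx : c * xx < NN := by omega
        have hcN : c < NN := by
          have : c ≤ c * xx := Nat.le_mul_of_pos_right c hx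
          omega
        simp only [jloopGo]
        rw [if_pos ⟨by exact_mod_cast hcxx, by exact_mod_cast hx⟩]
        -- the range query on bit2
        have hmul : (c+1) * xx = c * xx + xx := Nat.succ_mul c xx
        have hpos1 : 0 < c * xx := Nat.mul_pos hc hx
        have hr1 : c * xx + xx - 1 < L := by
          have h1 : c * xx ≤ NN - 1 := by omega
          revert h1; generalize c * xx = w; intro h1; omega
        have hr2 : c * xx - 1 < L := by
          revert hcxx; generalize c * xx = w; intro h1; omega
        have hrq : bitRangeQueryA bit2 ((c*xx : Nat):Int) (((c*xx:Nat):Int) + (xx:Int) - 1)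
            = ∑ t ∈ Finset.Ioc (c*xx - 1) (c*xx + xx - 1), pts2 t := by
          unfold bitRangeQueryA
          have e1 : ((c*xx:Nat):Int) + (xx:Int) - 1 = ((c*xx + xx - 1 : Nat):Int) := by
            revert hpos1; generalize c * xx = w; intro h1; omega
          have e2 : ((c*xx:Nat):Int) - 1 = ((c*xx - 1 : Nat):Int) := by
            revert hpos1; generalize c * xx = w; intro h1; omega
          rw [e1, e2]
          rw [bitQueryA_spec h2 (c*xx + xx - 1) hr1 0]
          rw [bitQueryA_spec h2 (c*xx - 1) hr2 0]
          have h9 : c*xx - 1 ≤ c*xx + xx - 1 := by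
            revert hpos1; generalize c * xx = w; intro h1; omega
          have := Finset.sum_Ioc_consecutive pts2 (by omega : 0 ≤ c*xx - 1) h9
          omega
        rw [hrq]
        -- the update of bit at position c*xx
        have hupd := covInv_update h1 hpos1 (by omega) (xx:Int)
        -- recast next index
        have hnext : ((c*xx:Nat):Int) + (xx:Int) = (((c+1)*xx : Nat):Int) := by push_cast; ring
        rw [hnext]
        obtain ⟨ihA, ihB⟩ := ih (c+1) (by omega) (by
            rw [hmul]
            revert hfuel; generalize c * xx = w; intro h1; omega) _ _ hupd (ans - (∑ t ∈ Finset.Ioc (c*xx - 1) (c*xx + xx - 1), pts2 t) * ((c*xx:Nat):Int))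
        constructor
        · rw [ihA]
          rw [Finset.sum_eq_sum_Ico_succ_bot hcN]
          rw [if_pos hcxx]
          ring
        · refine covInv_congr ?_ ihB
          intro t ht
          by_cases htc : t = c*xx
          · subst htc
            rw [if_pos rfl, if_neg (by
                rintro ⟨-, -, -, h4⟩
                rw [hmul] at h4
                revert h4; generalize c * xx = w; intro h4; omega)]
            rw [if_pos ⟨by omega, by omega, dvd_mul_left xx c, le_refl _⟩]
            ring
          · rw [if_neg htc]
            by_cases hcond : 1 ≤ t ∧ t < NN ∧ xx ∣ t ∧ (c+1)*xx ≤ t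
            · rw [if_pos hcond, if_pos ⟨hcond.1, hcond.2.1, hcond.2.2.1, by
                have h4 := hcond.2.2.2
                rw [hmul] at h4
                revert h4; generalize c * xx = w; intro h4; omega⟩]
              ring
            · rw [if_neg hcond, if_neg (by
                rintro ⟨ha1, ha2, ha3, ha4⟩
                refine hcond ⟨ha1, ha2, ha3, ?_⟩
                obtain ⟨e, he⟩ := ha3
                have he' : e ≠ c := by rintro rfl; exact htc (by rw [he]; ring)
                have he2 : c + 1 ≤ e := by
                  rcases Nat.lt_or_ge e c with hlt2 | hge
                  · exfalso
                    have : t ≤ (c-1) * xx := by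
                      rw [he]
                      calc xx * e ≤ xx * (c-1) := Nat.mul_le_mul_left xx (by omega)
                      _ = (c-1) * xx := by ring
                    have hle2 : (c-1) * xx + xx ≤ c * xx := by
                      have : (c-1) + 1 ≤ c := by omega
                      calc (c-1)*xx + xx = ((c-1)+1) * xx := by ring
                      _ ≤ c * xx := Nat.mul_le_mul_right xx (by omega)
                    omega
                  · omega
                calc (c+1) * xx ≤ e * xx := Nat.mul_le_mul_right xx he2
                _ = t := by rw [he]; ring)]
              ring

theorem jloopA_spec (L NN xx : Nat) (bit2 : List Int) (pts2 : Nat → Int)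
    (h2 : covInv L bit2 pts2) (hx : 0 < xx) (hL : L = 2*NN) (hxN : xx < NN) :
    ∀ (fuel : Nat) (c : Nat), 0 < c → NN ≤ c * xx + fuel →
    ∀ (bit : List Int) (pts1 : Nat → Int), covInv L bit pts1 → ∀ ans : Int,
    (jloopA bit2 (NN:Int) (xx:Int) bit ans ((c*xx : Nat):Int)).2
        = ans - ∑ m ∈ Finset.Ico c NN,
            (if m*xx < NN then (∑ t ∈ Finset.Ioc (m*xx - 1) (m*xx + xx - 1), pts2 t) * ((m*xx : Nat):Int) else 0)
    ∧ covInv L (jloopA bit2 (NN:Int) (xx:Int) bit ans ((c*xx:Nat):Int)).1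
        (fun t => pts1 t + if (1 ≤ t ∧ t < NN ∧ xx ∣ t ∧ c*xx ≤ t) then (xx:Int) else 0) := by
  intro fuel c hc hfuel bit pts1 h1 ans
  unfold jloopA
  exact jloopGo_spec L NN xx bit2 pts2 h2 hx hL hxN
    ((((NN:Nat):Int) - ((c*xx:Nat):Int)).toNat + 1) c hc (by omega) bit pts1 h1 ans
-- ===== abstract values =====
def vNat (a : List Int) (j : Nat) : Nat := (a.getD j 0).toNat

def pairS (a : List Int) (i : Nat) : Int :=
  ∑ p ∈ Finset.range i, ∑ q ∈ Finset.range p,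
    (PySem.Int.mod (a.getD p 0) (a.getD q 0) + PySem.Int.mod (a.getD q 0) (a.getD p 0))

def pts1f (a : List Int) (NN i t : Nat) : Int :=
  ∑ j ∈ Finset.range i, if 1 ≤ t ∧ t < NN ∧ vNat a j ∣ t then ((vNat a j : Nat) : Int) else 0

def pts2f (a : List Int) (i t : Nat) : Int :=
  ∑ j ∈ Finset.range i, if t = vNat a j then (1 : Int) else 0

def ppList (a : List Int) (nn i : Nat) : List Int :=
  (List.range nn).map (fun j => if j < i then pairS a (j + 1) else 0)

-- per-value block sum: picks out m = y / xx
theorem blocksum (y xx NN : Nat) (hx : 0 < xx) (hy : 0 < y) (hyN : y < NN) :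
    (∑ m ∈ Finset.Ico 1 NN,
        if m * xx < NN then (if m * xx - 1 < y ∧ y ≤ m * xx + xx - 1 then (1:Int) else 0) * ((m * xx : Nat) : Int) else 0)
      = ((xx * (y / xx) : Nat) : Int) := by
  by_cases hcase : y < xx
  · have h0 : y / xx = 0 := Nat.div_eq_of_lt hcase
    rw [h0, Nat.mul_zero]
    rw [Finset.sum_eq_zero]
    · simp
    · intro m hm
      rw [Finset.mem_Ico] at hm
      have hmx : xx ≤ m * xx := Nat.le_mul_of_pos_left xx hm.1
      split_ifs with h1 h2
      · exfalso
        obtain ⟨h3, _⟩ := h2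
        revert h3 hmx; generalize m * xx = w; intro h3 hmx; omega
      · ring
      · rfl
  · push_neg at hcase
    set m0 := y / xx with hm0
    have hdam := Nat.div_add_mod y xx
    have hmod := Nat.mod_lt y hx
    have hm01 : 1 ≤ m0 := (Nat.one_le_div_iff hx).mpr hcase
    have hdm : m0 * xx ≤ y := by
      have : m0 * xx = xx * m0 := by ring
      rw [this, hm0]; omega
    have hdm2 : y < m0 * xx + xx := by
      have : m0 * xx = xx * m0 := by ring
      rw [this, hm0]; omega
    have hm0y : m0 ≤ y := hm0 ▸ Nat.div_le_self y xx
    have hm0N : m0 < NN := by omega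
    have hm0pos : 0 < m0 * xx := Nat.mul_pos hm01 hx
    rw [Finset.sum_eq_single_of_mem m0 (Finset.mem_Ico.mpr ⟨hm01, hm0N⟩)]
    · rw [if_pos (by omega), if_pos (by
        constructor
        · revert hdm hm0pos; generalize m0 * xx = w; intro h1 h2; omega
        · revert hdm2 hm0pos; generalize m0 * xx = w; intro h1 h2; omega)]
      rw [one_mul]
      congr 1
      rw [hm0]; ring
    · intro m hm hne
      rw [Finset.mem_Ico] at hm
      by_cases hout : m * xx < NN
      · rw [if_pos hout]
        have hz : ¬ (m * xx - 1 < y ∧ y ≤ m * xx + xx - 1) := by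
          rcases Nat.lt_or_ge m m0 with hlt | hge
          · rintro ⟨-, h2⟩
            have h3 : m * xx + xx = (m+1) * xx := (Nat.succ_mul m xx).symm
            have h4 : (m+1) * xx ≤ m0 * xx := Nat.mul_le_mul_right xx (by omega)
            revert h2 hdm
            rw [h3]
            revert h4
            generalize (m+1) * xx = w1
            generalize m0 * xx = w2
            intro h4 h2 hdm2'
            omega
          · have hge1 : m0 + 1 ≤ m := by omega
            rintro ⟨h1, -⟩
            have h3 : m0 * xx + xx = (m0+1) * xx := (Nat.succ_mul m0 xx).symm
            have h4 : (m0+1) * xx ≤ m * xx := Nat.mul_le_mul_right xx hge1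
            have h5 : 0 < m * xx := Nat.mul_pos (by omega) hx
            revert h1 hdm2
            rw [← h3] at h4
            revert h4 h5
            generalize m * xx = w1
            intro h4 h5 h1 hdm2'
            omega
        rw [if_neg hz, zero_mul]
      · rw [if_neg hout]

theorem queryval (a : List Int) (NN i xx : Nat) (hxxN : xx < NN)
    (hv : ∀ j, j < i → 0 < vNat a j) :
    (∑ t ∈ Finset.Ioc 0 xx, pts1f a NN i t)
      = ∑ j ∈ Finset.range i, ((xx / vNat a j : Nat) : Int) * ((vNat a j : Nat) : Int) := by
  unfold pts1f
  rw [Finset.sum_comm]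
  refine Finset.sum_congr rfl ?_
  intro j hj
  rw [Finset.mem_range] at hj
  have hy := hv j hj
  rw [← sum_dvd_count (vNat a j) hy ((vNat a j : Nat) : Int) xx]
  refine Finset.sum_congr rfl ?_
  intro t ht
  rw [Finset.mem_Ioc] at ht
  by_cases hd : vNat a j ∣ t
  · rw [if_pos hd, if_pos ⟨by omega, by omega, hd⟩]
  · rw [if_neg hd, if_neg (by rintro ⟨-, -, h3⟩; exact hd h3)]

theorem jval (a : List Int) (NN i xx : Nat) (hx : 0 < xx)
    (hv : ∀ j, j < i → 0 < vNat a j ∧ vNat a j < NN) :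
    (∑ m ∈ Finset.Ico 1 NN,
        if m * xx < NN then (∑ t ∈ Finset.Ioc (m * xx - 1) (m * xx + xx - 1), pts2f a i t) * ((m * xx : Nat) : Int) else 0)
      = ∑ j ∈ Finset.range i, ((xx * (vNat a j / xx) : Nat) : Int) := by
  have hstep : ∀ m ∈ Finset.Ico 1 NN,
      (if m * xx < NN then (∑ t ∈ Finset.Ioc (m * xx - 1) (m * xx + xx - 1), pts2f a i t) * ((m * xx : Nat) : Int) else 0)
        = ∑ j ∈ Finset.range i,
            (if m * xx < NN then (if m * xx - 1 < vNat a j ∧ vNat a j ≤ m * xx + xx - 1 then (1:Int) else 0) * ((m * xx : Nat) : Int) else 0) := by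
    intro m hm
    split_ifs with hc
    · unfold pts2f
      rw [Finset.sum_comm]
      rw [Finset.sum_mul]
      refine Finset.sum_congr rfl ?_
      intro j hj
      congr 1
      rw [Finset.sum_ite_eq' (Finset.Ioc (m * xx - 1) (m * xx + xx - 1)) (vNat a j) (fun _ => (1:Int))]
      simp [Finset.mem_Ioc]
    · rw [Finset.sum_eq_zero]
      intro j hj
      rfl
  rw [Finset.sum_congr rfl hstep, Finset.sum_comm]
  refine Finset.sum_congr rfl ?_
  intro j hj
  rw [Finset.mem_range] at hj
  exact blocksum (vNat a j) xx NN hx (hv j hj).1 (hv j hj).2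

theorem pairterm (x y : Nat) (hx : 0 < x) (hy : 0 < y) :
    PySem.Int.mod (x:Int) (y:Int) + PySem.Int.mod (y:Int) (x:Int)
      = (x:Int) + (y:Int) - ((x / y : Nat):Int) * ((y:Nat):Int) - ((x * (y / x) : Nat):Int) := by
  rw [PySem.Int.mod_natCast, PySem.Int.mod_natCast]
  have h1 := Nat.div_add_mod x y
  have h2 := Nat.div_add_mod y x
  push_cast
  have h1' : (y:Int) * ((x / y : Nat):Int) + ((x % y : Nat):Int) = (x:Int) := by exact_mod_cast h1
  have h2' : (x:Int) * ((y / x : Nat):Int) + ((y % x : Nat):Int) = (y:Int) := by exact_mod_cast h2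
  linarith [h1', h2']

theorem ppList_zero (a : List Int) (nn : Nat) : ppList a nn 0 = List.replicate nn 0 := by
  apply List.ext_getElem
  · simp [ppList]
  · intro m h1 h2
    simp [ppList]

theorem ppList_set (a : List Int) (nn i : Nat) (hi : i < nn) :
    (ppList a nn i).set i (pairS a (i + 1)) = ppList a nn (i + 1) := by
  apply List.ext_getElem
  · simp [ppList]
  · intro m h1 h2
    rw [List.getElem_set]
    unfold ppList
    rw [List.getElem_map, List.getElem_map]
    simp only [List.getElem_range]
    split_ifs with hc h3 h4 <;> first
      | rfl
      | (try subst hc); omega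

theorem outerA (a : List Int) (NN nn : Nat) (hNN : 0 < NN)
    (hval : ∀ j, j < nn → 1 ≤ a.getD j 0 ∧ vNat a j < NN) :
    ∀ i, i ≤ nn →
      (let st := (PySem.List.pyRange 1 ((i:Int) + 1) 1).foldl (stepA a ((NN:Nat):Int))
          (List.replicate (2*NN) 0, List.replicate (2*NN) 0, List.replicate nn 0, 0, 0);
        covInv (2*NN) st.1 (pts1f a NN i) ∧ covInv (2*NN) st.2.1 (pts2f a i) ∧
        st.2.2.1 = ppList a nn i ∧ st.2.2.2.1 = pairS a i ∧
        st.2.2.2.2 = ∑ j ∈ Finset.range i, a.getD j 0) := by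
  intro i
  induction i with
  | zero =>
      intro _
      rw [PySem.List.pyRange_one_eq_nil (by norm_num)]
      refine ⟨?_, ?_, ?_, ?_, ?_⟩
      · exact covInv_congr (fun t ht => by simp [pts1f]) (covInv_zero (2*NN))
      · exact covInv_congr (fun t ht => by simp [pts2f]) (covInv_zero (2*NN))
      · exact (ppList_zero a nn).symm
      · simp [pairS]
      · simp
  | succ i ihi =>
      intro hile
      have ih := ihi (by omega)
      set st := (PySem.List.pyRange 1 ((i:Int) + 1) 1).foldl (stepA a ((NN:Nat):Int))
          (List.replicate (2*NN) 0, List.replicate (2*NN) 0, List.replicate nn 0, 0, 0) with hst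
      obtain ⟨h1, h2, h3, h4, h5⟩ := ih
      -- peel the last iteration
      have hrange : PySem.List.pyRange 1 (((i+1 : Nat):Int) + 1) 1
          = PySem.List.pyRange 1 ((i:Int) + 1) 1 ++ [(i:Int) + 1] := by
        have hcast : (((i+1 : Nat):Int) + 1) = ((i:Int) + 1) + 1 := by push_cast; ring
        rw [hcast, PySem.List.pyRange_one_succ_right (by omega)]
      rw [hrange, List.foldl_append]
      rw [← hst]
      simp only [List.foldl_cons, List.foldl_nil]
      -- facts about the current value
      have hvi := hval i (by omega)
      set xx := vNat a i with hxx
      have hxxpos : 0 < xx := by unfold vNat at hxx; omega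
      have hxxN : xx < NN := hvi.2
      have hgd : a.getD i 0 = ((xx : Nat) : Int) := by unfold vNat at hxx; omega
      have hidx : ((i:Int) + 1 - 1) = (i:Int) := by ring
      -- step unfolding
      simp only [stepA, hidx]
      rw [PySem.List.pyGetD_natCast]
      rw [hgd]
      -- the query
      have hq : bitQueryA st.1 ((xx:Nat):Int) 0
          = ∑ j ∈ Finset.range i, ((xx / vNat a j : Nat) : Int) * ((vNat a j : Nat) : Int) := by
        rw [bitQueryA_spec h1 xx (by omega) 0]
        rw [queryval a NN i xx hxxN (fun j hj => by
          have := (hval j (by omega)).1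
          unfold vNat; omega)]
        ring
      rw [hq]
      -- the j loop
      have honemul : 1 * xx = xx := one_mul xx
      obtain ⟨hjA, hjB⟩ := jloopA_spec (2*NN) NN xx st.2.1 (pts2f a i) h2 hxxpos rfl hxxN
          NN 1 (by omega) (by omega) st.1 (pts1f a NN i) h1
          (st.2.2.2.1 + ((xx:Nat):Int) * (i:Int) + st.2.2.2.2
            - ∑ j ∈ Finset.range i, ((xx / vNat a j : Nat) : Int) * ((vNat a j : Nat) : Int))
      rw [honemul] at hjA hjB
      have hvj : ∀ j, j < i → 0 < vNat a j ∧ vNat a j < NN := fun j hj =>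
        ⟨by have := (hval j (by omega)).1; unfold vNat; omega, (hval j (by omega)).2⟩
      -- the final accumulator value equals the cumulative pair sum
      have hansfinal : (jloopA st.2.1 ((NN:Nat):Int) ((xx:Nat):Int) st.1
          (st.2.2.2.1 + ((xx:Nat):Int) * (i:Int) + st.2.2.2.2
            - ∑ j ∈ Finset.range i, ((xx / vNat a j : Nat) : Int) * ((vNat a j : Nat) : Int))
          ((xx:Nat):Int)).2 = pairS a (i + 1) := by
        rw [hjA, jval a NN i xx hxxpos hvj, h4, h5]
        unfold pairS
        rw [Finset.sum_range_succ]
        have hper : ∀ j ∈ Finset.range i,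
            (PySem.Int.mod (a.getD i 0) (a.getD j 0) + PySem.Int.mod (a.getD j 0) (a.getD i 0))
              = ((xx:Nat):Int) + ((vNat a j:Nat):Int)
                - ((xx / vNat a j : Nat):Int) * ((vNat a j : Nat):Int)
                - ((xx * (vNat a j / xx):Nat):Int) := by
          intro j hj
          rw [Finset.mem_range] at hj
          have hgdj : a.getD j 0 = ((vNat a j : Nat):Int) := by
            have := (hval j (by omega)).1; unfold vNat; omega
          rw [hgd, hgdj]
          exact pairterm xx (vNat a j) hxxpos (hvj j hj).1
        rw [Finset.sum_congr rfl hper]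
        rw [Finset.sum_sub_distrib, Finset.sum_sub_distrib, Finset.sum_add_distrib]
        have hconst : (∑ _j ∈ Finset.range i, ((xx:Nat):Int)) = ((xx:Nat):Int) * (i:Int) := by
          rw [Finset.sum_const, Finset.card_range]
          simp [mul_comm]
        have hsum2 : (∑ j ∈ Finset.range i, a.getD j 0)
            = ∑ j ∈ Finset.range i, ((vNat a j:Nat):Int) := by
          refine Finset.sum_congr rfl ?_
          intro j hj
          rw [Finset.mem_range] at hj
          have := (hval j (by omega)).1
          unfold vNat; omega
        rw [hsum2, hconst]
        ring
      refine ⟨?_, ?_, ?_, ?_, ?_⟩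
      · -- bit_a invariant
        refine covInv_congr ?_ hjB
        intro t ht
        unfold pts1f
        rw [Finset.sum_range_succ]
        rw [← hxx]
        by_cases hcond : 1 ≤ t ∧ t < NN ∧ xx ∣ t
        · rw [if_pos hcond, if_pos ⟨hcond.1, hcond.2.1, hcond.2.2,
            Nat.le_of_dvd (by omega) hcond.2.2⟩]
        · rw [if_neg hcond, if_neg (by rintro ⟨u1, u2, u3, -⟩; exact hcond ⟨u1, u2, u3⟩)]
      · -- bit_a2 invariant
        have hupd2 := covInv_update h2 hxxpos (by omega) (1:Int)
        refine covInv_congr ?_ hupd2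
        intro t ht
        unfold pts2f
        rw [Finset.sum_range_succ, ← hxx]
      · -- p list
        rw [Int.toNat_natCast, h3, hansfinal, ppList_set a nn i (by omega)]
      · exact hansfinal
      · rw [h5, Finset.sum_range_succ, hgd]

theorem inner_fold (a : List Int) (x : Int) : ∀ (m : Nat) (init : Int),
    (PySem.List.pyRange 0 (m:Int) 1).foldl (fun t j =>
        let y := PySem.List.pyGetD a j 0
        t + (PySem.Int.mod x y + PySem.Int.mod y x)) init
      = init + ∑ q ∈ Finset.range m, (PySem.Int.mod x (a.getD q 0) + PySem.Int.mod (a.getD q 0) x) := by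
  intro m
  induction m with
  | zero =>
      intro init
      rw [PySem.List.pyRange_one_eq_nil (by norm_num)]
      simp
  | succ m ihm =>
      intro init
      have hc : ((m+1 : Nat):Int) = (m:Int) + 1 := by push_cast; ring
      rw [hc, PySem.List.pyRange_one_succ_right (by positivity), List.foldl_append]
      rw [ihm]
      simp only [List.foldl_cons, List.foldl_nil, PySem.List.pyGetD_natCast]
      rw [Finset.sum_range_succ]
      ring

theorem B_state (a : List Int) : ∀ (m : Nat),
    (PySem.List.pyRange 0 (m:Int) 1).foldl (fun (st : List Int × Int) i =>
        let x := PySem.List.pyGetD a i 0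
        let total := (PySem.List.pyRange 0 i 1).foldl (fun t j =>
            let y := PySem.List.pyGetD a j 0
            t + (PySem.Int.mod x y + PySem.Int.mod y x)) st.2
        (st.1 ++ [total], total)) (([] : List Int), (0 : Int))
      = ((List.range m).map (fun j => pairS a (j + 1)), pairS a m) := by
  intro m
  induction m with
  | zero =>
      rw [PySem.List.pyRange_one_eq_nil (by norm_num)]
      simp [pairS]
  | succ m ihm =>
      have hc : ((m+1 : Nat):Int) = (m:Int) + 1 := by push_cast; ring
      rw [hc, PySem.List.pyRange_one_succ_right (by positivity), List.foldl_append]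
      rw [ihm]
      simp only [List.foldl_cons, List.foldl_nil]
      rw [inner_fold a (PySem.List.pyGetD a (m:Int) 0) m (pairS a m)]
      have htot : pairS a m + ∑ q ∈ Finset.range m,
          (PySem.Int.mod (PySem.List.pyGetD a (m:Int) 0) (a.getD q 0)
            + PySem.Int.mod (a.getD q 0) (PySem.List.pyGetD a (m:Int) 0)) = pairS a (m+1) := by
        rw [PySem.List.pyGetD_natCast]
        unfold pairS
        rw [Finset.sum_range_succ]
      rw [htot]
      rw [List.range_succ, List.map_append]
      simp

theorem B_closed (n : Int) (a : List Int) :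
    calculate_p_values_alt n a = (List.range n.toNat).map (fun j => pairS a (j + 1)) := by
  unfold calculate_p_values_alt
  rcases le_or_gt n 0 with hn | hn
  · rw [PySem.List.pyRange_one_eq_nil hn]
    have : n.toNat = 0 := by omega
    rw [this]
    simp
  · have hcast : ((n.toNat : Nat) : Int) = n := by omega
    rw [← hcast, B_state a n.toNat]
    have : (max n 0).toNat = n.toNat := by omega
    simp [this]

theorem A_closed (n : Int) (a : List Int) (hne : a ≠ []) (hlen : n ≤ a.length)
    (hpos : ∀ y ∈ a.take n.toNat, 1 ≤ y) :
    calculate_p_values n a = (List.range n.toNat).map (fun j => pairS a (j + 1)) := by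
  unfold calculate_p_values
  rcases le_or_gt n 0 with hn | hn
  · rw [PySem.List.pyRange_one_eq_nil (by omega)]
    have h0 : n.toNat = 0 := by omega
    rw [h0]
    simp
  · obtain ⟨m, hm⟩ : ∃ m, PySem.List.max? a (fun y => y) = some m := by
      cases hmx : PySem.List.max? a (fun y => y) with
      | none => exact absurd ((PySem.List.max?_eq_none_iff a (fun y => y)).mp hmx) hne
      | some m => exact ⟨m, rfl⟩
    have hmax : ∀ y ∈ a, y ≤ m := by
      intro y hy
      exact PySem.List.max?_isMax hm y hy
    set nn := n.toNat with hnn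
    have hnncast : ((nn : Nat) : Int) = n := by omega
    have hnnlen : nn ≤ a.length := by omega
    have hval0 : ∀ j, j < nn → 1 ≤ a.getD j 0 ∧ a.getD j 0 ≤ m := by
      intro j hj
      have hjl : j < a.length := by omega
      have hsome : a[j]? = some a[j] := List.getElem?_eq_getElem hjl
      have hgd : a.getD j 0 = a[j] := by rw [List.getD_eq_getElem?_getD, hsome]; rfl
      constructor
      · rw [hgd]
        refine hpos _ ?_
        have : (a.take nn)[j]'(by rw [List.length_take]; omega) = a[j] := List.getElem_take
        rw [← this]
        exact List.getElem_mem _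
      · rw [hgd]
        exact hmax _ (List.getElem_mem hjl)
    have hm1 : 1 ≤ m := by
      have h00 := hval0 0 (by omega)
      omega
    set NN := (m+1).toNat with hNNdef
    have hNNc : ((NN : Nat) : Int) = m + 1 := by omega
    have hNNpos : 0 < NN := by omega
    have hval : ∀ j, j < nn → 1 ≤ a.getD j 0 ∧ vNat a j < NN := by
      intro j hj
      obtain ⟨hv1, hv2⟩ := hval0 j hj
      exact ⟨hv1, by unfold vNat; omega⟩
    rw [hm]
    simp only [Option.getD_some]
    have h2N : ((m + 1) * 2).toNat = 2 * NN := by omega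
    have hNc : (m + 1 : Int) = ((NN : Nat) : Int) := hNNc.symm
    rw [h2N, hNc]
    have hout := outerA a NN nn hNNpos hval nn (le_refl nn)
    rw [hnncast] at hout
    rw [hout.2.2.1]
    unfold ppList
    exact List.map_congr_left (by
      intro j hj
      rw [List.mem_range] at hj
      rw [if_pos hj])

-- ===== VERDICT (by name: the statement is the Claim_ definition above) =====
theorem calculate_p_values_spec : Claim_equal_calculate_p_values := by
  unfold Claim_equal_calculate_p_values
  intro n a_a hdom hpre
  obtain ⟨hne, hlen, hpos⟩ := hpre
  unfold Spec_calculate_p_values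
  rw [A_closed n a_a hne hlen hpos, B_closed]
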